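-- pv_equiv track=rewrite | github.com/dcschenc/myleetcode | 1943-count-pairs-of-equal-substrings-with-minimum-difference/1943-count-pairs-of-equal-substrings-with-minimum-difference.py | countQuadruples
-- ===== SOURCE A (Python) =====
-- def countQuadruples(firstString: str, secondString: str) -> int:
--     # If the chosen substrings are of size larger than 1, then you can remove all but the first character
--     # from both substrings, and you'll get equal substrings of size 1, with the same a but less j.
--     # Hence, it's always optimal to choose substrings of size 1.
--
--     # https://github.com/doocs/leetcode/tree/main/solution/1700-1799/1794.Count%20Pairs%20of%20Equal%20Substrings%20With%20Minimum%20Difference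
--     s1, s2 = firstString, secondString
--     ans, count = float('inf'), 0
--     hm = {}
--     j = len(s2) - 1
--     while j >= 0:
--         if s2[j] not in hm:
--             hm[s2[j]] = j
--         j -= 1
--     for i, c in enumerate(s1):
--         if c in hm:
--             if ans > (i - hm[c]):
--                 ans = (i - hm[c])
--                 count = 1
--             elif ans == (i - hm[c]):
--                 count += 1
--     return count
-- ===== SOURCE B (Python) =====
-- def countQuadruples(firstString: str, secondString: str) -> int:
--     # Per-character rfind (no dict), sort the differences, count the leading
--     # run of equal minimal values.
--     diffs = sorted(i - secondString.rfind(c)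
--                    for i, c in enumerate(firstString) if c in secondString)
--     k = 0
--     while k < len(diffs) and diffs[k] == diffs[0]:
--         k += 1
--     return k
-- ===== Notes on version B (the rewrite author's own statement) =====
-- stated objective: alternative
-- what changed: A builds a char->last-index dict with a backward while loop and tracks the running minimum difference and its count in one stateful streaming pass; B uses no dict at all: it looks up each character of firstString with secondString.rfind, sorts the resulting difference list, and returns the length of the leading run of equal (minimal) values.
import Mathlib
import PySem

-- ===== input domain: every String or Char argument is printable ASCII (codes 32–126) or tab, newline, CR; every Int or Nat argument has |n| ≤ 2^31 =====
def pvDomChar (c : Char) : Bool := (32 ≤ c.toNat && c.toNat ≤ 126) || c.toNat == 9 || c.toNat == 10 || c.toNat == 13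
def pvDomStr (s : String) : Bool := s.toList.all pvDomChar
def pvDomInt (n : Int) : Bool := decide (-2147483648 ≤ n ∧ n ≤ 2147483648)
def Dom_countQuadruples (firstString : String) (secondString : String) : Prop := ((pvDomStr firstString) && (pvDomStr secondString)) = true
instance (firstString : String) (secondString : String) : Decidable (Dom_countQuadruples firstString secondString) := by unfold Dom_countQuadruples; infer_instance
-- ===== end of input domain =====

-- B drops A's dict and streaming min/count tracking entirely: it looks up each
-- character with rfind, sorts the difference list, and counts the leading run of
-- equal minimal values (objective: alternative).


-- ===== PORT A =====
-- while j >= 0: if s2[j] not in hm: hm[s2[j]] = j; j -= 1   (n = j + 1; the index n is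
-- always in range when called from countQuadruples, so getD's default is never read)
def pvHmLoopA (s2 : List Char) : Nat → PySem.Dict Char Int → PySem.Dict Char Int
  | 0, hm => hm
  | n + 1, hm =>
      pvHmLoopA s2 n
        (if hm.contains (s2.getD n ' ') then hm else hm.insert (s2.getD n ' ') (n : Int))

-- the body of 'for i, c in enumerate(s1)'; st.1 = none plays float('inf')
def pvStepA (hm : PySem.Dict Char Int) (st : Option Int × Int) (p : Int × Char) : Option Int × Int :=
  if hm.contains p.2 then
    let d := p.1 - hm.getD p.2 0
    match st.1 with
    | none => (some d, 1)
    | some a => if a > d then (some d, 1) else if a = d then (some a, st.2 + 1) else st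
  else st

def countQuadruples (firstString : String) (secondString : String) : Int :=
  let s2 := secondString.toList
  let hm := pvHmLoopA s2 s2.length PySem.Dict.empty
  ((PySem.List.enumerate firstString.toList 0).foldl (pvStepA hm) (none, 0)).2

-- ===== PORT B =====
-- secondString.rfind(c) for one char: scan from the end, highest matching index, -1 if
-- absent (hand port, exact: rfind returns the largest index whose char equals c)
def pvRFindAux (l : List Char) : Nat → Char → Int
  | 0, _ => -1
  | n + 1, c => if l.getD n ' ' = c then (n : Int) else pvRFindAux l n c

def pvRFind (l : List Char) (c : Char) : Int := pvRFindAux l l.length c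

-- [i - secondString.rfind(c) for i, c in enumerate(firstString) if c in secondString]
def pvDiffsB (s2 : List Char) (s1 : List Char) : List Int :=
  (PySem.List.enumerate s1 0).filterMap
    (fun p => if s2.contains p.2 then some (p.1 - pvRFind s2 p.2) else none)

-- while k < len(diffs) and diffs[k] == diffs[0]: k += 1   (count the leading run equal to the head)
def pvRunAux (h : Int) : List Int → Int
  | [] => 0
  | x :: t => if x = h then 1 + pvRunAux h t else 0

def countQuadruples_alt (firstString : String) (secondString : String) : Int :=
  match PySem.List.sorted (pvDiffsB secondString.toList firstString.toList) (fun x => x) false with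
  | [] => 0
  | h :: t => pvRunAux h (h :: t)

-- ===== PRECONDITION & SPEC =====
def Spec_countQuadruples (firstString : String) (secondString : String) (out : Int) : Prop := out = countQuadruples_alt firstString secondString
instance (firstString : String) (secondString : String) (out : Int) : Decidable (Spec_countQuadruples firstString secondString out) := by unfold Spec_countQuadruples; infer_instance

-- ===== CLAIM (what is proved, stated in full; the proofs are below) =====
def Claim_equal_countQuadruples : Prop := ∀ (firstString : String) (secondString : String), Dom_countQuadruples firstString secondString → Spec_countQuadruples firstString secondString (countQuadruples firstString secondString)

-- ===== LEMMAS AND PROOFS =====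

-- last occurrence index of c among positions < n of l
def pvLastIdx (l : List Char) : Nat → Char → Option Int
  | 0, _ => none
  | n + 1, c => if l.getD n ' ' = c then some (n : Int) else pvLastIdx l n c

theorem pvHmLoopA_get? (l : List Char) (n : Nat) (d : PySem.Dict Char Int) (c : Char) :
    (pvHmLoopA l n d).get? c = Option.or (d.get? c) (pvLastIdx l n c) := by
  induction n generalizing d with
  | zero => simp [pvHmLoopA, pvLastIdx]
  | succ n ih =>
      simp only [pvHmLoopA]
      rw [ih]
      simp only [pvLastIdx]
      by_cases hc : l.getD n ' ' = c
      · rw [hc, if_pos rfl]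
        by_cases h : d.contains c = true
        · rw [if_pos h]
          have hs : (d.get? c).isSome = true := by
            rw [← PySem.Dict.contains_eq_isSome_get?]; exact h
          obtain ⟨v, hv⟩ := Option.isSome_iff_exists.mp hs
          simp [hv]
        · have hg : d.get? c = none := by
            rw [PySem.Dict.get?_eq_none_iff_contains]; simpa using h
          rw [if_neg h]
          simp [hg, PySem.Dict.get?_insert_self]
      · rw [if_neg hc]
        by_cases h : d.contains (l.getD n ' ') = true
        · rw [if_pos h]
        · rw [if_neg h, PySem.Dict.get?_insert_of_ne _ _ (fun e => hc e.symm)]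

theorem pvLastIdx_rfind (l : List Char) (n : Nat) (c : Char) (j : Int)
    (h : pvLastIdx l n c = some j) : pvRFindAux l n c = j := by
  induction n with
  | zero => simp [pvLastIdx] at h
  | succ n ih =>
      simp only [pvLastIdx] at h
      simp only [pvRFindAux]
      by_cases hc : l.getD n ' ' = c
      · rw [if_pos hc] at h ⊢; exact (Option.some.inj h)
      · rw [if_neg hc] at h ⊢; exact ih h

theorem pvLastIdx_isSome_iff (l : List Char) (n : Nat) (c : Char) :
    (pvLastIdx l n c).isSome = true ↔ ∃ k, k < n ∧ l.getD k ' ' = c := by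
  induction n with
  | zero => simp [pvLastIdx]
  | succ n ih =>
      simp only [pvLastIdx]
      by_cases hc : l.getD n ' ' = c
      · rw [if_pos hc]
        exact iff_of_true rfl ⟨n, Nat.lt_succ_self n, hc⟩
      · rw [if_neg hc, ih]
        constructor
        · rintro ⟨k, hk, hkc⟩; exact ⟨k, Nat.lt_succ_of_lt hk, hkc⟩
        · rintro ⟨k, hk, hkc⟩
          rcases Nat.lt_succ_iff_lt_or_eq.mp hk with h' | rfl
          · exact ⟨k, h', hkc⟩
          · exact absurd hkc hc

theorem pvLastIdx_contains (l : List Char) (c : Char) :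
    (pvLastIdx l l.length c).isSome = l.contains c := by
  have hiff : (pvLastIdx l l.length c).isSome = true ↔ c ∈ l := by
    rw [pvLastIdx_isSome_iff]
    constructor
    · rintro ⟨k, hk, hke⟩
      have hg : l[k] = c := by simpa [List.getD, hk] using hke
      rw [← hg]; exact List.getElem_mem hk
    · intro h
      obtain ⟨k, hk, hke⟩ := List.mem_iff_getElem.mp h
      exact ⟨k, hk, by simp [List.getD, hk, hke]⟩
  by_cases h : c ∈ l
  · simp [hiff.mpr h, h]
  · have hs : (pvLastIdx l l.length c).isSome ≠ true := fun hs => h (hiff.mp hs)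
    simp [Bool.eq_false_iff.mpr hs, h]

-- pointwise form: B's rfind-guarded lookup equals A's map lookup
theorem pvLookup_eq (l : List Char) (c : Char) (i : Int) :
    (if l.contains c then some (i - pvRFind l c) else none) =
      (pvLastIdx l l.length c).map (fun v => i - v) := by
  cases hg : pvLastIdx l l.length c with
  | none =>
      have hc : l.contains c = false := by rw [← pvLastIdx_contains, hg]; rfl
      have hm : c ∉ l := by simpa using hc
      simp [hm]
  | some j =>
      have hc : l.contains c = true := by rw [← pvLastIdx_contains, hg]; rfl
      have hm : c ∈ l := by simpa using hc
      simp [hm, pvRFind, pvLastIdx_rfind l l.length c j hg]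

-- the state A's loop maintains, as a function of the difference list seen so far
def pvOut (D : List Int) : Option Int × Int :=
  match D with
  | [] => (none, 0)
  | h :: t => (some (t.foldl min h), (((h :: t).count (t.foldl min h) : Int)))

theorem pvFoldlMin_le (t : List Int) (h : Int) : ∀ x ∈ h :: t, t.foldl min h ≤ x := by
  induction t generalizing h with
  | nil => intro x hx; simp at hx; simp [hx]
  | cons a t ih =>
      intro x hx
      rcases List.mem_cons.mp hx with rfl | hx'
      · calc t.foldl min (min x a) ≤ min x a := (ih (min x a) _ (List.mem_cons_self ..))
          _ ≤ x := min_le_left _ _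
      · rcases List.mem_cons.mp hx' with rfl | hx''
        · calc t.foldl min (min h x) ≤ min h x := (ih (min h x) _ (List.mem_cons_self ..))
            _ ≤ x := min_le_right _ _
        · exact ih (min h a) x (List.mem_cons_of_mem _ hx'')

theorem pvFoldlMin_mem (t : List Int) (h : Int) : t.foldl min h ∈ h :: t := by
  induction t generalizing h with
  | nil => simp
  | cons a t ih =>
      have := ih (min h a)
      rcases List.mem_cons.mp this with he | ht
      · rw [List.foldl_cons, he]
        rcases min_choice h a with h' | h' <;> rw [h']
        · exact List.mem_cons_self ..
        · exact List.mem_cons_of_mem _ (List.mem_cons_self ..)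
      · exact List.mem_cons_of_mem _ (List.mem_cons_of_mem _ ht)

theorem pvStepA_out (hm : PySem.Dict Char Int) (D : List Int) (p : Int × Char) :
    pvStepA hm (pvOut D) p =
      pvOut (D ++ ((hm.get? p.2).map (fun v => p.1 - v)).toList) := by
  cases hg : hm.get? p.2 with
  | none =>
      have hc : hm.contains p.2 = false := by
        rw [PySem.Dict.contains_eq_isSome_get?, hg]; rfl
      simp [pvStepA, hc]
  | some v =>
      have hc : hm.contains p.2 = true := by
        rw [PySem.Dict.contains_eq_isSome_get?, hg]; rfl
      have hgd : hm.getD p.2 0 = v := PySem.Dict.getD_of_get?_eq_some _ 0 hg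
      set d := p.1 - v with hd
      cases D with
      | nil => simp [pvStepA, hc, hgd, pvOut]
      | cons h t =>
          have hfold : (t ++ [d]).foldl min h = min (t.foldl min h) d := by
            simp [List.foldl_append]
          have hstep : pvStepA hm (pvOut (h :: t)) p =
              (if t.foldl min h > d then ((some d : Option Int), (1 : Int))
               else if t.foldl min h = d then
                 (some (t.foldl min h), ((h :: t).count (t.foldl min h) : Int) + 1)
               else pvOut (h :: t)) := by
            simp [pvStepA, hc, hgd, pvOut, ← hd]
          have hgoal : (((some v : Option Int)).map (fun v => p.1 - v)).toList = [d] := by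
            simp [← hd]
          rw [hgoal, hstep]
          have hcat : (h :: t) ++ [d] = h :: (t ++ [d]) := rfl
          rcases lt_trichotomy d (t.foldl min h) with hlt | heq | hgt
          · rw [if_pos hlt]
            have hnot : d ∉ h :: t := fun hmem =>
              absurd (pvFoldlMin_le t h d hmem) (not_le.mpr hlt)
            have hne : ¬ h = d := fun e => hnot (by simp [e])
            have hz : t.count d = 0 :=
              List.count_eq_zero.mpr (fun hm2 => hnot (List.mem_cons_of_mem _ hm2))
            have hcnt : (t ++ [d]).count d = t.count d + 1 := by
              rw [List.count_append]; simp
            simp [pvOut, hcat, hfold, min_eq_right (le_of_lt hlt), hcnt, hne, hz]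
          · rw [if_neg (by rw [← heq]; exact lt_irrefl d), if_pos heq.symm]
            have hcnt : (t ++ [d]).count d = t.count d + 1 := by
              rw [List.count_append]; simp
            simp [pvOut, hcat, hfold, ← heq, min_self, List.count_cons, hcnt]
            ring
          · rw [if_neg (not_lt_of_gt hgt), if_neg (ne_of_lt hgt)]
            have hcnt : (t ++ [d]).count (t.foldl min h) = t.count (t.foldl min h) := by
              rw [List.count_append]
              simp [(ne_of_gt hgt : d ≠ t.foldl min h)]
            simp [pvOut, hcat, hfold, min_eq_left (le_of_lt hgt), List.count_cons, hcnt]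

theorem pvLoopA_spec (hm : PySem.Dict Char Int) (xs : List (Int × Char)) (D : List Int) :
    xs.foldl (pvStepA hm) (pvOut D) =
      pvOut (D ++ xs.filterMap (fun p => (hm.get? p.2).map (fun v => p.1 - v))) := by
  induction xs generalizing D with
  | nil => simp
  | cons p xs ih =>
      rw [List.foldl_cons, pvStepA_out, ih, List.filterMap_cons]
      cases hg : hm.get? p.2 <;> simp

theorem countQuadruples_eq_out (s1 s2 : String) :
    countQuadruples s1 s2 = (pvOut (pvDiffsB s2.toList s1.toList)).2 := by
  have hdicts : ∀ c, (pvHmLoopA s2.toList s2.toList.length PySem.Dict.empty).get? c =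
      pvLastIdx s2.toList s2.toList.length c := by
    intro c
    rw [pvHmLoopA_get?]
    simp [PySem.Dict.get?_empty]
  have hdiffs :
      (PySem.List.enumerate s1.toList 0).filterMap
          (fun p => ((pvHmLoopA s2.toList s2.toList.length PySem.Dict.empty).get? p.2).map
            (fun v => p.1 - v)) =
        pvDiffsB s2.toList s1.toList := by
    unfold pvDiffsB
    refine List.filterMap_congr (fun p _ => ?_)
    rw [hdicts p.2, ← pvLookup_eq]
  show ((PySem.List.enumerate s1.toList 0).foldl
      (pvStepA (pvHmLoopA s2.toList s2.toList.length PySem.Dict.empty)) (none, 0)).2 = _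
  rw [show ((none, 0) : Option Int × Int) = pvOut [] from rfl, pvLoopA_spec, List.nil_append,
    hdiffs]

theorem pvRunAux_count (h : Int) (l : List Int) (hp : l.Pairwise (· ≤ ·))
    (hmin : ∀ y ∈ l, h ≤ y) : pvRunAux h l = (l.count h : Int) := by
  induction l with
  | nil => simp [pvRunAux]
  | cons x t ih =>
      rcases List.pairwise_cons.mp hp with ⟨hx, ht⟩
      by_cases he : x = h
      · subst he
        have : pvRunAux x t = (t.count x : Int) :=
          ih ht (fun y hy => hmin y (List.mem_cons_of_mem _ hy))
        simp [pvRunAux, this]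
        ring
      · have hlt : h < x := lt_of_le_of_ne (hmin x (List.mem_cons_self ..)) (fun e => he e.symm)
        have hz : t.count h = 0 := List.count_eq_zero.mpr (fun hmem =>
          absurd (lt_of_lt_of_le hlt (hx h hmem)) (lt_irrefl h))
        simp [pvRunAux, he, hz]

-- ===== VERDICT (by name: the statement is the Claim_ definition above) =====
theorem countQuadruples_spec : Claim_equal_countQuadruples := by
  intro s1 s2 _
  show countQuadruples s1 s2 = countQuadruples_alt s1 s2
  rw [countQuadruples_eq_out]
  unfold countQuadruples_alt
  generalize pvDiffsB s2.toList s1.toList = D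
  cases hS : PySem.List.sorted D (fun x => x) false with
  | nil =>
      have hp := PySem.List.sorted_perm (xs := D) (key := fun x => x) (rev := false)
      rw [hS] at hp
      rw [(List.Perm.nil_eq hp).symm]
      rfl
  | cons h t =>
      have hperm : (h :: t).Perm D := by
        have hp := PySem.List.sorted_perm (xs := D) (key := fun x => x) (rev := false)
        rwa [hS] at hp
      have hpair : (h :: t).Pairwise (· ≤ ·) := by
        have hp := PySem.List.sorted_pairwise (xs := D) (key := fun x => x)
        rwa [hS] at hp
      have hheadD : ∀ y ∈ D, h ≤ y := by
        have hp := PySem.List.key_head_sorted_le (xs := D) (key := fun x => x) (m := h) (t := t) hS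
        simpa using hp
      have hhead : ∀ y ∈ h :: t, h ≤ y := fun y hy => hheadD y (hperm.mem_iff.mp hy)
      cases hD : D with
      | nil => rw [hD] at hperm; simp at hperm
      | cons d0 dt =>
          rw [hD] at hperm hheadD
          have hm1 : dt.foldl min d0 ≤ h :=
            pvFoldlMin_le dt d0 h (hperm.mem_iff.mp (List.mem_cons_self ..))
          have hm2 : h ≤ dt.foldl min d0 := hheadD _ (pvFoldlMin_mem dt d0)
          have hmin_eq : dt.foldl min d0 = h := le_antisymm hm1 hm2
          have hrun : pvRunAux h (h :: t) = ((h :: t).count h : Int) :=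
            pvRunAux_count h (h :: t) hpair hhead
          show (pvOut (d0 :: dt)).2 = pvRunAux h (h :: t)
          rw [hrun, hperm.count_eq h]
          simp [pvOut, hmin_eq]
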